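-- pv_equiv track=rewrite | github.com/kasperfg16/p8_sewbot | src/gym_training/envs/UR5_env_ddpg_no_noise_test.py | index_difference
-- ===== SOURCE A (Python) =====
-- def index_difference(arr1, arr2):
--     difference = []
--     for i in range(len(arr1)):
--         if i < len(arr2):
--             diff = abs(i - arr2[i])
--             difference.append(diff)
--         else:
--             difference.append(i)
--     return difference
-- ===== SOURCE B (Python) =====
-- def index_difference(arr1, arr2):
--     def solve(lo, hi):
--         if hi - lo <= 1:
--             if lo >= hi:
--                 return []
--             return [abs(lo - arr2[lo]) if lo < len(arr2) else lo]
--         mid = (lo + hi) // 2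
--         return solve(lo, mid) + solve(mid, hi)
--     return solve(0, len(arr1))
-- ===== Notes on version B (the rewrite author's own statement) =====
-- stated objective: alternative
-- what changed: Replaces the single branching loop with a divide-and-conquer recursion that splits the index interval [0, len(arr1)) at its midpoint and concatenates the two halves, computing each element only in the length-1 base case.
import Mathlib
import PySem

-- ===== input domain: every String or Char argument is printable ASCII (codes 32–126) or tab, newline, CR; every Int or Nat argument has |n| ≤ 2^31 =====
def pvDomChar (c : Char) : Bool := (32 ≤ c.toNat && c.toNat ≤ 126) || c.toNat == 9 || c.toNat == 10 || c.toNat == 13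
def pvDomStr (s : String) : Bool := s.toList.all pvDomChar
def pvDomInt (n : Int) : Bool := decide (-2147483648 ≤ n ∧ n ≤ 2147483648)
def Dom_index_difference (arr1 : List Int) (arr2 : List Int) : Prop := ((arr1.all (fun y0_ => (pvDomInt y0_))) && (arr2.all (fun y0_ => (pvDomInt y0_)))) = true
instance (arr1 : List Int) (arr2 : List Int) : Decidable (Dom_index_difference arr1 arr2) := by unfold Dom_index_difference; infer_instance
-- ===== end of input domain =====

-- B replaces A's single branching loop by a divide-and-conquer over the index interval (alternative decomposition, same values).

-- ===== PORT A =====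
-- one branching loop over range(len(arr1)), appending per element
def index_difference (arr1 : List Int) (arr2 : List Int) : List Int :=
  (PySem.List.pyRange 0 arr1.length 1).foldl
    (fun difference i =>
      if i < (arr2.length : Int) then
        difference ++ [|i - PySem.List.pyGetD arr2 i 0|]
      else
        difference ++ [i]) []

-- ===== PORT B =====
-- B: divide and conquer — split [lo, hi) at mid = (lo+hi)//2, base case an interval of length ≤ 1
def pvSolveB (arr2 : List Int) (lo hi : Nat) : List Int :=
  if hi - lo ≤ 1 then
    if lo ≥ hi then []
    else [if lo < arr2.length then |(lo : Int) - PySem.List.pyGetD arr2 (lo : Int) 0| else (lo : Int)]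
  else
    pvSolveB arr2 lo ((lo + hi) / 2) ++ pvSolveB arr2 ((lo + hi) / 2) hi
termination_by hi - lo
decreasing_by all_goals omega

def index_difference_alt (arr1 : List Int) (arr2 : List Int) : List Int :=
  pvSolveB arr2 0 arr1.length

-- ===== PRECONDITION & SPEC =====
def Spec_index_difference (arr1 : List Int) (arr2 : List Int) (out : List Int) : Prop := out = index_difference_alt arr1 arr2
instance (arr1 : List Int) (arr2 : List Int) (out : List Int) : Decidable (Spec_index_difference arr1 arr2 out) := by unfold Spec_index_difference; infer_instance

-- ===== CLAIM (what is proved, stated in full; the proofs are below) =====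
def Claim_equal_index_difference : Prop := ∀ (arr1 : List Int) (arr2 : List Int), Dom_index_difference arr1 arr2 → Spec_index_difference arr1 arr2 (index_difference arr1 arr2)

-- ===== LEMMAS AND PROOFS =====

-- the common element formula both sides compute at index k
def pvElem (arr2 : List Int) (k : Nat) : Int :=
  if k < arr2.length then |(k : Int) - PySem.List.pyGetD arr2 (k : Int) 0| else (k : Int)

theorem pvSolveB_eq_map (arr2 : List Int) (lo hi : Nat) :
    pvSolveB arr2 lo hi = (List.range' lo (hi - lo)).map (pvElem arr2) := by
  fun_induction pvSolveB arr2 lo hi with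
  | case1 lo hi _ _ =>
    have : hi - lo = 0 := by omega
    simp [this]
  | case2 lo hi h1 h2 =>
    have : hi - lo = 1 := by omega
    simp [this, pvElem]
  | case3 lo hi h ih1 ih2 =>
    rw [ih1, ih2, ← List.map_append]
    have hm1 : lo + 1 * ((lo + hi) / 2 - lo) = (lo + hi) / 2 := by omega
    have hm2 : ((lo + hi) / 2 - lo) + (hi - (lo + hi) / 2) = hi - lo := by omega
    have h3 := List.range'_append (s := lo) (m := (lo + hi) / 2 - lo) (n := hi - (lo + hi) / 2) (step := 1)
    rw [hm1, hm2] at h3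
    rw [h3]

-- ===== VERDICT (by name: the statement is the Claim_ definition above) =====
theorem index_difference_spec : Claim_equal_index_difference := by
  intro arr1 arr2 _
  unfold Spec_index_difference index_difference index_difference_alt
  have hbody : ∀ (acc : List Int) (i : Int), i ∈ PySem.List.pyRange 0 arr1.length 1 →
      (if i < (arr2.length : Int) then acc ++ [|i - PySem.List.pyGetD arr2 i 0|] else acc ++ [i])
        = acc ++ [if i < (arr2.length : Int) then |i - PySem.List.pyGetD arr2 i 0| else i] := by
    intro acc i _
    split <;> rfl
  rw [PySem.List.foldl_congr_mem _ _ _ _ hbody,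
      PySem.List.foldl_append_singleton_eq_map, List.nil_append,
      PySem.List.pyRange_zero_natCast, List.map_map,
      pvSolveB_eq_map, Nat.sub_zero, ← List.range_eq_range']
  refine List.map_congr_left ?_
  intro k _
  simp only [Function.comp_apply, pvElem]
  by_cases hk : k < arr2.length
  · have : (k : Int) < (arr2.length : Int) := by exact_mod_cast hk
    simp [hk, this]
  · have : ¬ ((k : Int) < (arr2.length : Int)) := by exact_mod_cast hk
    simp [hk, this]
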